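-- pv_equiv track=rewrite | github.com/Tatsu015/adddoxy | function_util.py | extract_indent
-- ===== SOURCE A (Python) =====
-- def extract_indent(func_str):
--     indent = ""
--     for s in func_str:
--         if s != " ":
--             return indent
--         else:
--             indent += " "
--     return indent
-- ===== SOURCE B (Python) =====
-- def extract_indent(func_str):
--     n = len(func_str) - len(func_str.lstrip(' '))
--     return ' ' * n
-- ===== Notes on version B (the rewrite author's own statement) =====
-- stated objective: idiomatic
-- what changed: Replaced the per-character scan with early return and string accumulation by a closed-form count of leading spaces via lstrip restricted to the space character, returning that many spaces with one string multiplication.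
import Mathlib
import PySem

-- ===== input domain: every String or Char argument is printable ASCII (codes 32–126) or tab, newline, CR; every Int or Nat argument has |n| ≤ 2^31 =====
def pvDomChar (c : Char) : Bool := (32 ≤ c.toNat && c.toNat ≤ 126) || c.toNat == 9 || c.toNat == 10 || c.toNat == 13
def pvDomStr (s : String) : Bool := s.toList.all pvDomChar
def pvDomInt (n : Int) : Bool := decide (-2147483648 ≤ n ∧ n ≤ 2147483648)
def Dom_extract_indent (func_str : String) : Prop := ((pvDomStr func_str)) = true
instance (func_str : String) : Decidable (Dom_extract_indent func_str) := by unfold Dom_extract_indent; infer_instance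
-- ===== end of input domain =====

-- B replaces A's scan-and-accumulate loop by a closed-form space count (len - len(lstrip(' '))) and one string multiplication (idiomatic).

-- ===== PORT A =====
-- the for-loop with early return, over the characters, accumulating `indent`
def extractIndentLoopA : List Char → List Char → List Char
  | [], indent => indent
  | c :: rest, indent => if c ≠ ' ' then indent else extractIndentLoopA rest (indent ++ [' '])

def extract_indent (func_str : String) : String :=
  String.mk (extractIndentLoopA func_str.toList [])

-- ===== PORT B =====
-- n = len(s) - len(s.lstrip(' ')); lstrip(' ') is ported exactly as dropping the leading run of ' ' (dropWhile); ' ' * n is replicate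
def extract_indent_alt (func_str : String) : String :=
  let n : Nat := func_str.toList.length - (func_str.toList.dropWhile (fun c => c == ' ')).length
  String.mk (List.replicate n ' ')

-- ===== PRECONDITION & SPEC =====
def Spec_extract_indent (func_str : String) (out : String) : Prop := out = extract_indent_alt func_str
instance (func_str : String) (out : String) : Decidable (Spec_extract_indent func_str out) := by unfold Spec_extract_indent; infer_instance

-- ===== CLAIM (what is proved, stated in full; the proofs are below) =====
def Claim_equal_extract_indent : Prop := ∀ (func_str : String), Dom_extract_indent func_str → Spec_extract_indent func_str (extract_indent func_str)

-- ===== LEMMAS AND PROOFS =====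
theorem extractIndentLoopA_eq (l acc : List Char) :
    extractIndentLoopA l acc = acc ++ List.replicate (l.takeWhile (fun c => c == ' ')).length ' ' := by
  induction l generalizing acc with
  | nil => simp [extractIndentLoopA]
  | cons c rest ih =>
    by_cases h : c = ' '
    · subst h
      simp [extractIndentLoopA, ih, List.replicate_succ]
    · simp [extractIndentLoopA, h]

theorem takeWhile_len (l : List Char) :
    (l.takeWhile (fun c => c == ' ')).length
      = l.length - (l.dropWhile (fun c => c == ' ')).length := by
  have h := List.takeWhile_append_dropWhile (p := fun c => c == ' ') (l := l)
  have : (l.takeWhile (fun c => c == ' ')).length + (l.dropWhile (fun c => c == ' ')).length = l.length := by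
    calc (l.takeWhile (fun c => c == ' ')).length + (l.dropWhile (fun c => c == ' ')).length
        = (l.takeWhile (fun c => c == ' ') ++ l.dropWhile (fun c => c == ' ')).length := (List.length_append).symm
      _ = l.length := by rw [h]
  omega

-- ===== VERDICT (by name: the statement is the Claim_ definition above) =====
theorem extract_indent_spec : Claim_equal_extract_indent := by
  intro s _
  unfold Spec_extract_indent extract_indent extract_indent_alt
  rw [extractIndentLoopA_eq, takeWhile_len]
  simp
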